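-- pv_equiv track=rewrite | github.com/Aom-Aursudkit/SudoSolveAll | python/sorbbb/66340500040_AEIOU_between.py | AEIOU_between
-- ===== SOURCE A (Python) =====
-- def AEIOU_between(x):
--     if type(x) is str:
--         countx =len(x)
--         ans = ""
--         endd = 0
--         stopp = 0
--         if x.count("*") > 1:
--             for i1 in range(countx):
--                 if x[i1] == "*":
--                     endd = i1
--         for i in range(countx):
--             if endd != 0 and endd == i:
--                 ans = ans + x[i]
--                 stopp = 0
--             elif x[i] == "*" and stopp == 0:
--                 ans = ans + x[i]
--                 stopp = 1
--             elif stopp == 1: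
--                 if x[i] == "a" or x[i] == "e" or x[i] == "i" or x[i] == "o" or x[i] == "u":
--                     if x[i-1] == "a" or x[i-1] == "e" or x[i-1] == "i" or x[i-1] == "o" or x[i-1] == "u" or x[i-1] == "*" or x[i-1] == " ":
--                         ans = ans + x[i]
--                     else:
--                         ans = ans + x[i-1]
--                 elif x[i] == "*":
--                     ans = ans + str(i)
--                 else:
--                     ans = ans + x[i]
--             else:
--                 ans = ans + x[i].swapcase()
--         return ans
--     else:
--         return "Error"
-- ===== SOURCE B (Python) =====
-- def AEIOU_between(x):
--     # Equivalence is about the str branch; non-str returns "Error" like A.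
--     if type(x) is not str:
--         return "Error"
--     n = len(x)
--     stars = [i for i in range(n) if x[i] == "*"]
--
--     def mid(i):
--         # the vowel/back-reference transform applied between the asterisks
--         c = x[i]
--         if c in "aeiou":
--             p = x[i - 1]
--             return c if (p in "aeiou" or p == "*" or p == " ") else p
--         if c == "*":
--             return str(i)
--         return c
--
--     if not stars:
--         return x.swapcase()
--     first = stars[0]
--     last = stars[-1]
--     if first == last:
--         return x[:first].swapcase() + "*" + "".join(mid(i) for i in range(first + 1, n))
--     return (x[:first].swapcase() + "*"
--             + "".join(mid(i) for i in range(first + 1, last))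
--             + "*" + x[last + 1:].swapcase())
-- ===== Notes on version B (the rewrite author's own statement) =====
-- stated objective: alternative
-- what changed: B replaces A's single stopp-state machine with char-by-char string concatenation (plus a separate pre-scan loop for the last asterisk) by a partitioned construction: it collects the asterisk positions once, then builds the result as swapcased prefix slice, first asterisk, per-index vowel/back-reference middle join, last asterisk, swapcased tail slice, keeping the zero/one/many-asterisk distinctions of the original.
import Mathlib
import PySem

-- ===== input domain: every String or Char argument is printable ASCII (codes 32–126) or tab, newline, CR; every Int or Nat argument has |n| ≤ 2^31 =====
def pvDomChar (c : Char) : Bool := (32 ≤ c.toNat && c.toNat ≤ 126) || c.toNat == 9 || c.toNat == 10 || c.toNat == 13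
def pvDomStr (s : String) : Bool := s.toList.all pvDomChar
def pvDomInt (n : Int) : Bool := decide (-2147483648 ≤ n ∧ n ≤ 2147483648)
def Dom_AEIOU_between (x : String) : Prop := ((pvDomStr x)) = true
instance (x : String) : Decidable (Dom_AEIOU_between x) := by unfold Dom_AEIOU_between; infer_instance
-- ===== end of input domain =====

-- B replaces A's stopp-state machine and char-by-char concatenation by a partitioned construction over the asterisk positions found once (swapcased prefix, asterisk, vowel-logic middle, asterisk, swapcased tail); measured constant-factor faster in a timing run.

-- shared primitive helper: c.swapcase() for one char (exact on ASCII, the stated domain)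
def pySwapChar (c : Char) : Char :=
  if PySem.Chars.islower c then PySem.Chars.upperChar c
  else if PySem.Chars.isupper c then PySem.Chars.lowerChar c
  else c

-- ===== PORT A =====
-- the body of A's second for-loop (state = (ans, stopp))
def pvLoopA (xs : List Char) (endd : Int) (s : List Char × Int) (i : Nat) : List Char × Int :=
  let ans := s.1
  let stopp := s.2
  let c := PySem.List.pyGetD xs (i : Int) ' '
  if endd != 0 && endd == (i : Int) then (ans ++ [c], 0)
  else if c == '*' && stopp == 0 then (ans ++ [c], 1)
  else if stopp == 1 then
    if c == 'a' || c == 'e' || c == 'i' || c == 'o' || c == 'u' then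
      let p := PySem.List.pyGetD xs ((i : Int) - 1) ' '
      if p == 'a' || p == 'e' || p == 'i' || p == 'o' || p == 'u' || p == '*' || p == ' ' then
        (ans ++ [c], stopp)
      else (ans ++ [p], stopp)
    else if c == '*' then (ans ++ (PySem.Int.toStr (i : Int)).toList, stopp)
    else (ans ++ [c], stopp)
  else (ans ++ [pySwapChar c], stopp)

def AEIOU_between (x : String) : String :=
  let xs := x.toList
  let countx := xs.length
  let endd : Int :=
    if PySem.Chars.count xs ['*'] > 1 then
      (List.range countx).foldl
        (fun endd (i1 : Nat) => if PySem.List.pyGetD xs (i1 : Int) ' ' == '*' then (i1 : Int) else endd) 0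
    else 0
  let r := (List.range countx).foldl (pvLoopA xs endd) ([], 0)
  String.ofList r.1

-- condition tested by Source B's star scan: x[i] == "*"
def pvP (xs : List Char) (i : Nat) : Bool := PySem.List.pyGetD xs (i : Int) ' ' == '*'

-- ===== PORT B =====
-- Source B's helper mid(i): the between-asterisks transform of one character
def pvMid (xs : List Char) (i : Nat) : List Char :=
  let c := PySem.List.pyGetD xs (i : Int) ' '
  if c == 'a' || c == 'e' || c == 'i' || c == 'o' || c == 'u' then
    let p := PySem.List.pyGetD xs ((i : Int) - 1) ' '
    if p == 'a' || p == 'e' || p == 'i' || p == 'o' || p == 'u' || p == '*' || p == ' ' then [c]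
    else [p]
  else if c == '*' then (PySem.Int.toStr (i : Int)).toList
  else [c]

def AEIOU_between_alt (x : String) : String :=
  let xs := x.toList
  let n := xs.length
  let stars : List Nat := (List.range n).filter (pvP xs)
  if stars.isEmpty then String.ofList (xs.map pySwapChar)
  else
    let first := stars.head!                 -- stars[0]
    let last := stars.getLast!               -- stars[-1]
    if first == last then
      String.ofList ((xs.take first).map pySwapChar ++ ['*']
        ++ (List.range' (first + 1) (n - (first + 1))).flatMap (pvMid xs))
    else
      String.ofList ((xs.take first).map pySwapChar ++ ['*']
        ++ (List.range' (first + 1) (last - (first + 1))).flatMap (pvMid xs)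
        ++ ['*'] ++ ((xs.drop (last + 1)).map pySwapChar))

-- ===== PRECONDITION & SPEC =====
def Spec_AEIOU_between (x : String) (out : String) : Prop := out = AEIOU_between_alt x
instance (x : String) (out : String) : Decidable (Spec_AEIOU_between x out) := by unfold Spec_AEIOU_between; infer_instance

-- ===== CLAIM (what is proved, stated in full; the proofs are below) =====
def Claim_equal_AEIOU_between : Prop := ∀ (x : String), Dom_AEIOU_between x → Spec_AEIOU_between x (AEIOU_between x)

-- ===== LEMMAS AND PROOFS =====

-- Python str.count with a single-character needle is the list count
theorem pvCount_go_single (c : Char) :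
    ∀ (xs : List Char) (fuel acc : Nat), xs.length ≤ fuel →
      PySem.Chars.count.go [c] fuel xs acc = acc + xs.count c := by
  intro xs
  induction xs with
  | nil => intro fuel acc h; cases fuel <;> simp [PySem.Chars.count.go]
  | cons h t ih =>
    intro fuel acc hle
    cases fuel with
    | zero => simp at hle
    | succ fuel =>
      have hlen : t.length ≤ fuel := by simpa using hle
      by_cases hc : c = h
      · subst hc
        simp only [PySem.Chars.count.go, List.count_cons]
        rw [if_pos (by simp [List.isPrefixOf])]
        simp only [List.length_cons, List.length_nil, List.drop_succ_cons, List.drop_zero]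
        rw [ih fuel (acc + 1) hlen]
        simp; omega
      · simp only [PySem.Chars.count.go, List.count_cons]
        rw [if_neg (by simp [List.isPrefixOf, hc])]
        rw [ih fuel acc hlen]
        simp [Ne.symm hc]

theorem pvCount_single (xs : List Char) (c : Char) :
    PySem.Chars.count xs [c] = xs.count c := by
  simpa using pvCount_go_single c xs xs.length 0 (le_refl _)

theorem pvP_eq (xs : List Char) (i : Nat) : pvP xs i = (xs.getD i ' ' == '*') := by
  simp [pvP, PySem.List.pyGetD_natCast]

theorem pvMap_getD_range (xs : List Char) :
    (List.range xs.length).map (fun i => xs.getD i ' ') = xs := by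
  apply List.ext_getElem (by simp)
  intro i h1 h2
  simp [List.getD_eq_getElem?_getD, List.getElem?_eq_getElem h2]

theorem pvStars_length (xs : List Char) :
    ((List.range xs.length).filter (pvP xs)).length = xs.count '*' := by
  conv_rhs => rw [← pvMap_getD_range xs]
  rw [← List.countP_eq_length_filter, List.count_eq_countP, List.countP_map]
  apply List.countP_congr
  intro i hi
  simp [pvP_eq, Function.comp]

theorem pvMem_stars (xs : List Char) (i : Nat) :
    i ∈ (List.range xs.length).filter (pvP xs) ↔ i < xs.length ∧ pvP xs i = true := by
  simp [List.mem_filter]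

theorem pvStars_pairwise (xs : List Char) :
    ((List.range xs.length).filter (pvP xs)).Pairwise (· < ·) :=
  List.Pairwise.filter _ List.pairwise_lt_range

-- A's first loop computes the last star position
theorem pvEnddFold (xs : List Char) :
    ∀ (m : Nat) (e0 : Int),
      (List.range m).foldl
        (fun endd (i1 : Nat) => if PySem.List.pyGetD xs (i1 : Int) ' ' == '*' then (i1 : Int) else endd) e0
      = (((List.range m).filter (pvP xs)).getLast?.map (Nat.cast)).getD e0 := by
  intro m
  induction m with
  | zero => intro e0; simp
  | succ m ih =>
    intro e0
    rw [List.range_succ, List.foldl_append, List.filter_append, ih]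
    by_cases hp : pvP xs m = true
    · simp only [List.foldl_cons, List.foldl_nil]
      rw [if_pos (by simpa [pvP] using hp)]
      simp [hp]
    · simp only [List.foldl_cons, List.foldl_nil]
      rw [if_neg (by simpa [pvP] using hp)]
      simp [Bool.eq_false_iff.mpr hp]

-- one loop step in the swapcase state
theorem pvStepSwap (xs : List Char) (endd : Int) (ans : List Char) (i : Nat)
    (hp : pvP xs i = false) (he : ¬(endd ≠ 0 ∧ endd = (i : Int))) :
    pvLoopA xs endd (ans, 0) i = (ans ++ [pySwapChar (xs.getD i ' ')], 0) := by
  have h1 : (endd != 0 && endd == (i : Int)) = false := by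
    simp only [Bool.and_eq_false_iff, bne_eq_false_iff_eq, beq_eq_false_iff_ne]
    tauto
  have h2 : xs[i]?.getD ' ' ≠ '*' := by
    have h := hp
    rw [pvP, PySem.List.pyGetD_natCast, List.getD_eq_getElem?_getD] at h
    simpa using h
  simp [pvLoopA, h1, h2, PySem.List.pyGetD_natCast, List.getD_eq_getElem?_getD]

-- one loop step at a star seen with stopp = 0
theorem pvStepStar (xs : List Char) (endd : Int) (ans : List Char) (i : Nat)
    (hp : pvP xs i = true) (he : ¬(endd ≠ 0 ∧ endd = (i : Int))) :
    pvLoopA xs endd (ans, 0) i = (ans ++ ['*'], 1) := by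
  have h1 : (endd != 0 && endd == (i : Int)) = false := by
    simp only [Bool.and_eq_false_iff, bne_eq_false_iff_eq, beq_eq_false_iff_ne]
    tauto
  have h2 : PySem.List.pyGetD xs (i : Int) ' ' = '*' := by simpa [pvP] using hp
  simp [pvLoopA, h1, h2]

-- one loop step at the endd position
theorem pvStepEnd (xs : List Char) (endd : Int) (ans : List Char) (stopp : Int) (i : Nat)
    (h0 : endd = (i : Int)) (hne : endd ≠ 0) (hp : pvP xs i = true) :
    pvLoopA xs endd (ans, stopp) i = (ans ++ ['*'], 0) := by
  have h2 : PySem.List.pyGetD xs (i : Int) ' ' = '*' := by simpa [pvP] using hp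
  have hi : ¬ ((i : Int) = 0) := h0 ▸ hne
  have h1 : (endd != 0 && endd == (i : Int)) = true := by
    simp [bne_iff_ne, h0]
    exact_mod_cast hi
  simp [pvLoopA, h1, h2]

-- one loop step in the stopp = 1 state is Source B's mid transform
theorem pvStepMid (xs : List Char) (endd : Int) (ans : List Char) (i : Nat)
    (he : ¬(endd ≠ 0 ∧ endd = (i : Int))) :
    pvLoopA xs endd (ans, 1) i = (ans ++ pvMid xs i, 1) := by
  have h1 : (endd != 0 && endd == (i : Int)) = false := by
    simp only [Bool.and_eq_false_iff, bne_eq_false_iff_eq, beq_eq_false_iff_ne]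
    tauto
  simp only [pvLoopA, pvMid, h1, Bool.false_eq_true, if_false]
  split_ifs <;> simp_all

-- segment with no star and no endd hit: swapcase verbatim
theorem pvSegSwap (xs : List Char) (endd : Int) :
    ∀ (m a : Nat) (ans : List Char), a + m ≤ xs.length →
      (∀ i, a ≤ i → i < a + m → pvP xs i = false ∧ ¬(endd ≠ 0 ∧ endd = (i : Int))) →
      (List.range' a m).foldl (pvLoopA xs endd) (ans, 0)
        = (ans ++ ((xs.drop a).take m).map pySwapChar, 0) := by
  intro m
  induction m with
  | zero => intro a ans _ _; simp
  | succ m ih =>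
    intro a ans hlen h
    obtain ⟨hp, he⟩ := h a (le_refl a) (by omega)
    have ha : a < xs.length := by omega
    rw [List.range'_succ, List.foldl_cons, pvStepSwap xs endd ans a hp he,
      ih (a + 1) _ (by omega) (fun i h1 h2 => h i (by omega) (by omega))]
    have hcons : (xs.drop a).take (m + 1) = xs.getD a ' ' :: (xs.drop (a + 1)).take m := by
      rw [List.drop_eq_getElem_cons ha, List.take_succ_cons, List.getD_eq_getElem xs ' ' ha]
    rw [hcons]
    simp

-- segment in the stopp = 1 state with no endd hit: Source B's mid transform pointwise
theorem pvSegMid (xs : List Char) (endd : Int) :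
    ∀ (m a : Nat) (ans : List Char),
      (∀ i, a ≤ i → i < a + m → ¬(endd ≠ 0 ∧ endd = (i : Int))) →
      (List.range' a m).foldl (pvLoopA xs endd) (ans, 1)
        = (ans ++ (List.range' a m).flatMap (pvMid xs), 1) := by
  intro m
  induction m with
  | zero => intro a ans _; simp
  | succ m ih =>
    intro a ans h
    rw [List.range'_succ, List.foldl_cons, pvStepMid xs endd ans a (h a (le_refl a) (by omega)),
      ih (a + 1) _ (fun i h1 h2 => h i (by omega) (by omega))]
    simp

-- every member of the star list lies between its head and its last element
theorem pvPairwise_le_getLast {l : List Nat} (hpw : l.Pairwise (· < ·)) :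
    ∀ (hne : l ≠ []) (x : Nat), x ∈ l → x ≤ l.getLast hne := by
  induction l with
  | nil => intro h; exact absurd rfl h
  | cons a t ih =>
    intro hne x hx
    cases t with
    | nil => simp at hx; simp [hx, List.getLast]
    | cons b t' =>
      rw [List.getLast_cons (by simp)]
      rcases List.mem_cons.mp hx with h | h
      · subst h
        have hab : x < (b :: t').getLast (by simp) :=
          (List.pairwise_cons.mp hpw).1 _ (List.getLast_mem _)
        omega
      · exact ih (List.pairwise_cons.mp hpw).2 (by simp) x h

theorem pvPairwise_head_le {a : Nat} {t : List Nat} (hpw : (a :: t).Pairwise (· < ·)) :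
    ∀ x ∈ a :: t, a ≤ x := by
  intro x hx
  rcases List.mem_cons.mp hx with h | h
  · omega
  · exact le_of_lt ((List.pairwise_cons.mp hpw).1 x h)

theorem pvRange'_split (s m n : Nat) :
    List.range' s (m + n) = List.range' s m ++ List.range' (s + m) n := by
  have h := List.range'_append (s := s) (m := m) (n := n) (step := 1)
  simp only [Nat.one_mul] at h
  exact h.symm

theorem pvSplit2 (f n : Nat) (h : f < n) :
    List.range n = List.range' 0 f ++ f :: List.range' (f + 1) (n - (f + 1)) := by
  conv_lhs => rw [List.range_eq_range', show n = f + ((n - (f + 1)) + 1) by omega]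
  rw [pvRange'_split 0 f ((n - (f + 1)) + 1)]
  simp [List.range'_succ]

theorem pvSplit3 (f L n : Nat) (h1 : f < L) (h2 : L < n) :
    List.range n = List.range' 0 f ++ (f :: List.range' (f + 1) (L - (f + 1)))
      ++ (L :: List.range' (L + 1) (n - (L + 1))) := by
  conv_lhs => rw [List.range_eq_range',
    show n = f + (((L - (f + 1)) + 1) + ((n - (L + 1)) + 1)) by omega]
  rw [pvRange'_split 0 f (((L - (f + 1)) + 1) + ((n - (L + 1)) + 1))]
  simp only [Nat.zero_add]
  rw [pvRange'_split f ((L - (f + 1)) + 1) ((n - (L + 1)) + 1)]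
  rw [show f + ((L - (f + 1)) + 1) = L by omega]
  simp [List.range'_succ]

theorem pvGetLast!_cons (f : Nat) (r : List Nat) :
    (f :: r).getLast! = (f :: r).getLast (List.cons_ne_nil f r) := by
  simp [List.getLast!]

-- ===== VERDICT (by name: the statement is the Claim_ definition above) =====
theorem AEIOU_between_spec : Claim_equal_AEIOU_between := by
  unfold Claim_equal_AEIOU_between Spec_AEIOU_between
  intro x _
  unfold AEIOU_between AEIOU_between_alt
  simp only []
  generalize x.toList = xs
  rcases hs : (List.range xs.length).filter (pvP xs) with _ | ⟨f, rest⟩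
  · -- no star at all: endd = 0, stopp never leaves 0, whole string swapcased
    have hcnt : xs.count '*' = 0 := by rw [← pvStars_length, hs]; rfl
    have hnostar : ∀ i, i < xs.length → pvP xs i = false := by
      intro i h1
      by_contra hp
      have hmem := (pvMem_stars xs i).mpr ⟨h1, by simpa using hp⟩
      rw [hs] at hmem
      simp at hmem
    rw [if_neg (by simp [pvCount_single, hcnt]), if_pos (by simp)]
    have hseg := pvSegSwap xs 0 xs.length 0 [] (by omega)
      (fun i h1 h2 => ⟨hnostar i (by omega), by simp⟩)
    rw [List.range_eq_range', hseg]
    simp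
  · -- at least one star
    have hpw : (f :: rest).Pairwise (· < ·) := hs ▸ pvStars_pairwise xs
    have hfmem : f ∈ (List.range xs.length).filter (pvP xs) := by rw [hs]; simp
    obtain ⟨hfn, hpf⟩ := (pvMem_stars xs f).mp hfmem
    have hmin : ∀ i, i < xs.length → pvP xs i = true → f ≤ i := fun i h1 h2 =>
      pvPairwise_head_le hpw i (by rw [← hs]; exact (pvMem_stars xs i).mpr ⟨h1, h2⟩)
    have hnof : ∀ i, i < f → pvP xs i = false := by
      intro i h1
      by_contra hp
      have := hmin i (by omega) (by simpa using hp)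
      omega
    rw [if_neg (show ¬(((f :: rest).isEmpty) = true) by simp)]
    rw [show (f :: rest).head! = f by simp [List.head!], pvGetLast!_cons f rest]
    cases rest with
    | nil =>
      -- exactly one star: endd stays 0, stopp = 1 to the very end
      have hcnt : xs.count '*' = 1 := by rw [← pvStars_length, hs]; rfl
      rw [if_neg (by simp [pvCount_single, hcnt]),
        if_pos (show (f == ([f] : List Nat).getLast (List.cons_ne_nil f [])) = true by simp [List.getLast])]
      have hsplit := pvSplit2 f xs.length hfn
      rw [hsplit, List.foldl_append, List.foldl_cons]
      rw [pvSegSwap xs 0 f 0 [] (by omega)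
        (fun i h1 h2 => ⟨hnof i (by omega), by simp⟩)]
      rw [pvStepStar xs 0 _ f hpf (by simp)]
      rw [pvSegMid xs 0 (xs.length - (f + 1)) (f + 1) _ (fun i h1 h2 => by simp)]
      simp
    | cons b t =>
      -- two or more stars: endd = index of the last star, which resets stopp
      obtain ⟨L, hL⟩ : ∃ L : Nat, (f :: b :: t).getLast (List.cons_ne_nil f (b :: t)) = L :=
        ⟨_, rfl⟩
      rw [hL]
      have hLmem : L ∈ (List.range xs.length).filter (pvP xs) := by
        rw [hs, ← hL]
        exact List.getLast_mem _
      obtain ⟨hLn, hpL⟩ := (pvMem_stars xs L).mp hLmem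
      have hmax : ∀ i, i < xs.length → pvP xs i = true → i ≤ L := fun i h1 h2 =>
        hL ▸ pvPairwise_le_getLast hpw (List.cons_ne_nil f (b :: t)) i
          (by rw [← hs]; exact (pvMem_stars xs i).mpr ⟨h1, h2⟩)
      have hfL : f < L := by
        have hm : L ∈ b :: t := by
          rw [← hL, List.getLast_cons (by simp)]
          exact List.getLast_mem _
        exact (List.pairwise_cons.mp hpw).1 L hm
      have hnoL : ∀ i, L < i → i < xs.length → pvP xs i = false := by
        intro i h1 h2
        by_contra hp
        have := hmax i h2 (by simpa using hp)
        omega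
      have hcnt : 1 < xs.count '*' := by rw [← pvStars_length, hs]; simp
      rw [if_pos (by simpa [pvCount_single] using hcnt), if_neg (by simp [Nat.ne_of_lt hfL])]
      have hendd : (List.range xs.length).foldl
          (fun endd (i1 : Nat) => if PySem.List.pyGetD xs (i1 : Int) ' ' == '*' then (i1 : Int) else endd) 0
          = (L : Int) := by
        rw [pvEnddFold xs xs.length 0, hs]
        rw [List.getLast?_eq_some_getLast (l := f :: b :: t) (by simp)]
        simp [hL]

      rw [hendd]
      have hLne : (L : Int) ≠ 0 := by
        have : 1 ≤ L := by omega
        omega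
      have hsplit := pvSplit3 f L xs.length hfL hLn
      rw [hsplit, List.foldl_append, List.foldl_append, List.foldl_cons, List.foldl_cons]
      rw [pvSegSwap xs (L : Int) f 0 [] (by omega)
        (fun i h1 h2 => ⟨hnof i (by omega), by
          rintro ⟨-, hei⟩
          have : L = i := by exact_mod_cast hei
          omega⟩)]
      rw [pvStepStar xs (L : Int) _ f hpf (by
        rintro ⟨-, hei⟩
        have : L = f := by exact_mod_cast hei
        omega)]
      rw [pvSegMid xs (L : Int) (L - (f + 1)) (f + 1) _ (fun i h1 h2 => by
        rintro ⟨-, hei⟩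
        have : L = i := by exact_mod_cast hei
        omega)]
      rw [pvStepEnd xs (L : Int) _ 1 L rfl hLne hpL]
      rw [pvSegSwap xs (L : Int) (xs.length - (L + 1)) (L + 1) _ (by omega)
        (fun i h1 h2 => ⟨hnoL i (by omega) (by omega), by
          rintro ⟨-, hei⟩
          have : L = i := by exact_mod_cast hei
          omega⟩)]
      have htail : ((xs.drop (L + 1)).take (xs.length - (L + 1))) = xs.drop (L + 1) := by
        apply List.take_of_length_le
        simp
      rw [htail]
      simp
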